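-- pv_equiv track=rewrite | github.com/hubsamkyub/translations_project | translation_manager_0621/tools/enhanced_integrated_translation_manager.py | create_comparison_keys
-- ===== SOURCE A (Python) =====
-- def create_comparison_keys(data_dict, criteria):
--     """비교 기준에 따른 키 생성"""
--     mapped_data = {}
--
--     for unique_key, data in data_dict.items():
--         string_id = data.get('string_id', '')
--         file_name = data.get('file_name', '')
--         sheet_name = data.get('sheet_name', '')
--         kr_text = data.get('kr', '')
--         cn_text = data.get('cn', '')
--         tw_text = data.get('tw', '')
--
--         # 비교 기준에 따른 키 생성
--         comparison_key = None
--
--         if criteria == "file_id":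
--             comparison_key = f"{file_name}:{string_id}"
--         elif criteria == "sheet_id":
--             comparison_key = f"{sheet_name}:{string_id}"
--         elif criteria == "id_only":
--             comparison_key = string_id
--         elif criteria == "id_kr":
--             comparison_key = f"{string_id}:{kr_text}"
--         elif criteria == "kr_only":
--             comparison_key = kr_text
--         elif criteria == "id_cn":
--             comparison_key = f"{string_id}:{cn_text}"
--         elif criteria == "id_tw":
--             comparison_key = f"{string_id}:{tw_text}"
--
--         if comparison_key:
--             # 같은 키에 여러 데이터가 있으면 리스트로 관리
--             if comparison_key not in mapped_data:
--                 mapped_data[comparison_key] = []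
--             mapped_data[comparison_key].append(data)
--
--     return mapped_data
-- ===== SOURCE B (Python) =====
-- def _comparison_key(data, criteria):
--     """The comparison key for one record, or None for an unknown criteria."""
--     if criteria == "file_id":
--         return f"{data.get('file_name', '')}:{data.get('string_id', '')}"
--     if criteria == "sheet_id":
--         return f"{data.get('sheet_name', '')}:{data.get('string_id', '')}"
--     if criteria == "id_only":
--         return data.get('string_id', '')
--     if criteria == "id_kr":
--         return f"{data.get('string_id', '')}:{data.get('kr', '')}"
--     if criteria == "kr_only":
--         return data.get('kr', '')
--     if criteria == "id_cn":
--         return f"{data.get('string_id', '')}:{data.get('cn', '')}"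
--     if criteria == "id_tw":
--         return f"{data.get('string_id', '')}:{data.get('tw', '')}"
--     return None
--
--
-- def create_comparison_keys(data_dict, criteria):
--     """Group data by comparison key: staged passes (key pairs, distinct keys, gather) instead of a single accumulating pass."""
--     pairs = [(k, d) for d in data_dict.values() for k in (_comparison_key(d, criteria),) if k]
--     return {k: [d for kk, d in pairs if kk == k]
--             for k in dict.fromkeys(k for k, _ in pairs)}
-- ===== Notes on version B (the rewrite author's own statement) =====
-- stated objective: alternative
-- what changed: Replaces A's single accumulating pass (per-item if/elif key chain plus manual not-in/init/append dict bookkeeping) with staged passes: first materialise the list of (key, record) pairs, then take the distinct keys in first-occurrence order via dict.fromkeys, then for each distinct key gather its records by scanning the pair list.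
import Mathlib
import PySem

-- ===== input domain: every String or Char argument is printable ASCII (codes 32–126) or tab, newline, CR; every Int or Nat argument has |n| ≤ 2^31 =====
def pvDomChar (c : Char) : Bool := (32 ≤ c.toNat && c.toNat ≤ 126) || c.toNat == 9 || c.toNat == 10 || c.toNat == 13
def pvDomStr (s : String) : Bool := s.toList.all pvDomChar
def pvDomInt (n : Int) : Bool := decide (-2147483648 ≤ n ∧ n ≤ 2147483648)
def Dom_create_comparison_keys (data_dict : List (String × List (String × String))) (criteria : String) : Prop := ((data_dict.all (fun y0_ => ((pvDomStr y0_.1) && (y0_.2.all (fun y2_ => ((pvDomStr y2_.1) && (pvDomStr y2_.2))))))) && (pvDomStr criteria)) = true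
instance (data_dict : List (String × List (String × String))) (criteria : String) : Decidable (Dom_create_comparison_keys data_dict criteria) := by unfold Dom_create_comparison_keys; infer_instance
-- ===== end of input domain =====

-- B replaces A's single dict-accumulating pass by staged passes: build the (key, record)
-- pair list, take distinct keys in first-occurrence order, then gather per key; objective: alternative.

-- ===== PORT A =====
-- shared field lookup: data.get(k, '') on an association-list dict (first match)
def pvGet (data : List (String × String)) (k : String) : String :=
  match data.find? (fun p => p.1 == k) with
  | some p => p.2
  | none => ""

def create_comparison_keys (data_dict : List (String × List (String × String))) (criteria : String) : List (String × List (List (String × String))) :=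
  (data_dict.foldl (fun (mapped : PySem.Dict String (List (List (String × String)))) kv =>
      let data := kv.2
      let string_id := pvGet data "string_id"
      let file_name := pvGet data "file_name"
      let sheet_name := pvGet data "sheet_name"
      let kr_text := pvGet data "kr"
      let cn_text := pvGet data "cn"
      let tw_text := pvGet data "tw"
      let comparison_key : Option String :=
        if criteria == "file_id" then some (file_name ++ ":" ++ string_id)
        else if criteria == "sheet_id" then some (sheet_name ++ ":" ++ string_id)
        else if criteria == "id_only" then some string_id
        else if criteria == "id_kr" then some (string_id ++ ":" ++ kr_text)
        else if criteria == "kr_only" then some kr_text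
        else if criteria == "id_cn" then some (string_id ++ ":" ++ cn_text)
        else if criteria == "id_tw" then some (string_id ++ ":" ++ tw_text)
        else none
      match comparison_key with
      | none => mapped
      | some key =>
        if key ≠ "" then
          let mapped1 := if mapped.contains key then mapped else mapped.insert key []
          mapped1.modify key [] (fun l => l ++ [data])
        else mapped)
    PySem.Dict.empty).items

-- ===== PORT B =====
-- _comparison_key(data, criteria): the comparison key of one record, none for unknown criteria
def pvKey? (data : List (String × String)) (criteria : String) : Option String :=
  if criteria == "file_id" then some (pvGet data "file_name" ++ ":" ++ pvGet data "string_id")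
  else if criteria == "sheet_id" then some (pvGet data "sheet_name" ++ ":" ++ pvGet data "string_id")
  else if criteria == "id_only" then some (pvGet data "string_id")
  else if criteria == "id_kr" then some (pvGet data "string_id" ++ ":" ++ pvGet data "kr")
  else if criteria == "kr_only" then some (pvGet data "kr")
  else if criteria == "id_cn" then some (pvGet data "string_id" ++ ":" ++ pvGet data "cn")
  else if criteria == "id_tw" then some (pvGet data "string_id" ++ ":" ++ pvGet data "tw")
  else none

def create_comparison_keys_alt (data_dict : List (String × List (String × String))) (criteria : String) : List (String × List (List (String × String))) :=
  -- pairs = [(k, d) for d in data_dict.values() for k in (_comparison_key(d, criteria),) if k]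
  let pairs := data_dict.filterMap (fun kv =>
    match pvKey? kv.2 criteria with
    | some k => if k ≠ "" then some (k, kv.2) else none
    | none => none)
  -- {k: [d for kk, d in pairs if kk == k] for k in dict.fromkeys(k for k, _ in pairs)}
  (PySem.List.dedup (pairs.map (·.1))).map
    (fun k => (k, (pairs.filter (fun p => p.1 == k)).map (·.2)))

-- ===== PRECONDITION & SPEC =====
def Spec_create_comparison_keys (data_dict : List (String × List (String × String))) (criteria : String) (out : List (String × List (List (String × String)))) : Prop := out = create_comparison_keys_alt data_dict criteria
instance (data_dict : List (String × List (String × String))) (criteria : String) (out : List (String × List (List (String × String)))) : Decidable (Spec_create_comparison_keys data_dict criteria out) := by unfold Spec_create_comparison_keys; infer_instance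

-- ===== CLAIM (what is proved, stated in full; the proofs are below) =====
def Claim_equal_create_comparison_keys : Prop := ∀ (data_dict : List (String × List (String × String))) (criteria : String), Dom_create_comparison_keys data_dict criteria → Spec_create_comparison_keys data_dict criteria (create_comparison_keys data_dict criteria)

-- ===== LEMMAS AND PROOFS =====
-- A's "if key not in d: d[key] = []" followed by the append equals one modify.
theorem pv_step_eq (d : PySem.Dict String (List (List (String × String)))) (k : String)
    (x : List (String × String)) :
    (if d.contains k then d else d.insert k []).modify k [] (fun l => l ++ [x])
      = d.modify k [] (fun l => l ++ [x]) := by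
  by_cases h : d.contains k = true
  · simp [h]
  · have h0 : (d.items.any fun p => p.1 == k) = false := Bool.eq_false_iff.mpr h
    have hmem : ∀ p ∈ d.items, ¬(p.1 == k) = true := List.any_eq_false.mp h0
    have hf : List.find? (fun p => p.1 == k) d.items = none := List.find?_eq_none.mpr hmem
    have hmap : ∀ (v : List (List (String × String))),
        d.items.map (fun p => if p.1 = k then (k, v) else p) = d.items := by
      intro v
      have := List.map_congr_left (l := d.items)
        (f := fun p => if p.1 = k then (k, v) else p) (g := fun p => p)
        (fun p hp => if_neg (by simpa using hmem p hp))
      simpa using this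
    simp [PySem.Dict.modify, PySem.Dict.insert, PySem.Dict.contains, PySem.Dict.get?,
      PySem.Dict.getD, h0, hf, List.any_append, List.find?_append, hmap]

-- A's loop over records with key function kf is the modify-fold over the filtered pair list.
theorem pv_foldA (kf : List (String × String) → String)
    (dd : List (String × List (String × String)))
    (d : PySem.Dict String (List (List (String × String)))) :
    dd.foldl (fun m kv =>
        if kf kv.2 ≠ "" then
          (if m.contains (kf kv.2) then m else m.insert (kf kv.2) []).modify (kf kv.2) []
            (fun l => l ++ [kv.2])
        else m) d
      = (dd.filterMap (fun kv => if kf kv.2 ≠ "" then some (kf kv.2, kv.2) else none)).foldl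
          (fun m p => m.modify p.1 [] (fun l => l ++ [p.2])) d := by
  induction dd generalizing d with
  | nil => rfl
  | cons kv dd ih =>
    rw [List.foldl_cons, List.filterMap_cons]
    by_cases h : kf kv.2 = ""
    · rw [if_neg (not_not_intro h), if_neg (not_not_intro h)]
      exact ih d
    · rw [if_pos h, if_pos h, pv_step_eq]
      exact ih _

-- items of the grouping fold = gather form over the distinct keys.
theorem pv_items_group (pairs : List (String × List (String × String))) :
    (pairs.foldl (fun m p => m.modify p.1 [] (fun l => l ++ [p.2]))
        (PySem.Dict.empty : PySem.Dict String (List (List (String × String))))).items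
      = (PySem.List.dedup (pairs.map (·.1))).map
          (fun k => (k, (pairs.filter (fun p => p.1 == k)).map (·.2))) := by
  rw [PySem.Dict.items_eq_map_keys _
      (PySem.Dict.nodup_keys_foldl_modify_key pairs Prod.fst []
        (fun m p => fun l => l ++ [p.2]) PySem.Dict.empty (by simp)) []]
  rw [PySem.Dict.keys_foldl_modify_key]
  simp [PySem.Set.update_nil_left, PySem.Dict.getD_foldl_modify_append]

-- ===== VERDICT (by name: the statement is the Claim_ definition above) =====
theorem create_comparison_keys_spec : Claim_equal_create_comparison_keys := by
  intro data_dict criteria _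
  unfold Spec_create_comparison_keys create_comparison_keys create_comparison_keys_alt
  by_cases h1 : criteria = "file_id"
  · subst h1
    simp only [pvKey?, beq_self_eq_true, if_true]
    rw [pv_foldA (fun data => pvGet data "file_name" ++ ":" ++ pvGet data "string_id")]
    exact pv_items_group _
  · by_cases h2 : criteria = "sheet_id"
    · subst h2
      simp only [pvKey?, beq_self_eq_true, if_true, String.reduceBEq, Bool.false_eq_true, if_false]
      rw [pv_foldA (fun data => pvGet data "sheet_name" ++ ":" ++ pvGet data "string_id")]
      exact pv_items_group _
    · by_cases h3 : criteria = "id_only"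
      · subst h3
        simp only [pvKey?, beq_self_eq_true, if_true, String.reduceBEq, Bool.false_eq_true, if_false]
        rw [pv_foldA (fun data => pvGet data "string_id")]
        exact pv_items_group _
      · by_cases h4 : criteria = "id_kr"
        · subst h4
          simp only [pvKey?, beq_self_eq_true, if_true, String.reduceBEq, Bool.false_eq_true, if_false]
          rw [pv_foldA (fun data => pvGet data "string_id" ++ ":" ++ pvGet data "kr")]
          exact pv_items_group _
        · by_cases h5 : criteria = "kr_only"
          · subst h5
            simp only [pvKey?, beq_self_eq_true, if_true, String.reduceBEq, Bool.false_eq_true, if_false]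
            rw [pv_foldA (fun data => pvGet data "kr")]
            exact pv_items_group _
          · by_cases h6 : criteria = "id_cn"
            · subst h6
              simp only [pvKey?, beq_self_eq_true, if_true, String.reduceBEq, Bool.false_eq_true, if_false]
              rw [pv_foldA (fun data => pvGet data "string_id" ++ ":" ++ pvGet data "cn")]
              exact pv_items_group _
            · by_cases h7 : criteria = "id_tw"
              · subst h7
                simp only [pvKey?, beq_self_eq_true, if_true, String.reduceBEq, Bool.false_eq_true, if_false]
                rw [pv_foldA (fun data => pvGet data "string_id" ++ ":" ++ pvGet data "tw")]
                exact pv_items_group _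
              · simp [pvKey?, h1, h2, h3, h4, h5, h6, h7, PySem.Dict.empty]
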